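-- pv_equiv track=rewrite | github.com/Sriram-PR/CodeSage | backend/codesage_pipeline.py | _parse_bugs
-- ===== SOURCE A (Python) =====
-- from typing import List, Dict, Any
--
-- def _parse_bugs(bug_section: str) -> List[Dict[str, str]]:
--     """Parses bugs (same as before)."""
--     bugs = []
--     lines = bug_section.split('\n')
--     current_bug = None
--
--     for line in lines:
--         line = line.strip()
--         if not line:
--             continue
--
--         if line[0].isdigit():
--             if current_bug:
--                 bugs.append(current_bug)
--             parts = line.split('.', 1)
--             if len(parts) > 1:
--                 title = parts[1].strip()
--             else:
--                 title = "Unnamed Bug"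
--             current_bug = {"title": title, "description": ""}
--         elif current_bug:
--             current_bug["description"] += line + "\n"
--
--     if current_bug:
--         bugs.append(current_bug)
--     return bugs
-- ===== SOURCE B (Python) =====
-- def _parse_bugs(bug_section):
--     """Two-phase: group stripped non-empty lines by digit-leading headers, then map groups to dicts."""
--     stripped = [ln.strip() for ln in bug_section.split('\n')]
--     nonempty = [ln for ln in stripped if ln]
--     groups = []
--     for ln in nonempty:
--         if ln[0].isdigit():
--             groups.append([ln])
--         elif groups:
--             groups[-1].append(ln)
--     bugs = []
--     for g in groups:
--         parts = g[0].split('.', 1)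
--         title = parts[1].strip() if len(parts) > 1 else "Unnamed Bug"
--         desc = ""
--         for s in g[1:]:
--             desc += s + "\n"
--         bugs.append({"title": title, "description": desc})
--     return bugs
-- ===== Notes on version B (the rewrite author's own statement) =====
-- stated objective: alternative
-- what changed: A's single pass with a mutable current-bug dict is replaced by a two-phase decomposition: first partition the stripped non-empty lines into groups starting at digit-leading lines (dropping lines before the first), then map each group to its bug dict.
import Mathlib
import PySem

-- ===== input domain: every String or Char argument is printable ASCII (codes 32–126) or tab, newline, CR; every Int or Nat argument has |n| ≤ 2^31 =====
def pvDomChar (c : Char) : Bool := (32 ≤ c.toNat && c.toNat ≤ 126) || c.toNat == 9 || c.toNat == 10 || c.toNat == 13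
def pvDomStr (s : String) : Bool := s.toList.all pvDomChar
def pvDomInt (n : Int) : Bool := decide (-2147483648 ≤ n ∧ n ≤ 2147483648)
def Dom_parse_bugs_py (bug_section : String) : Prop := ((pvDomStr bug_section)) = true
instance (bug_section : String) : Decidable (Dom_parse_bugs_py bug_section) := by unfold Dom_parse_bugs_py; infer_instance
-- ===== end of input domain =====

-- B re-implements A's single-pass mutable-dict parser as a two-phase decomposition (group lines, then map
-- each group to a bug dict); objective: alternative structure, same cost.

-- ===== PORT A =====
-- A's loop state: (bugs accumulated so far, current_bug : Option dict)
def pvStepA (st : List (PySem.Dict String String) × Option (PySem.Dict String String))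
    (rawline : String) : List (PySem.Dict String String) × Option (PySem.Dict String String) :=
  let line := PySem.Str.strip rawline
  if line = "" then st                        -- 'if not line: continue'
  else if (match line.toList with | c :: _ => PySem.Chars.isdigit c | [] => false) then
                                              -- 'line[0].isdigit()' (line nonempty here)
    let bugs := match st.2 with               -- 'if current_bug: bugs.append(current_bug)'
      | some cb => st.1 ++ [cb]
      | none => st.1
    let parts := (PySem.Str.splitMax? line "." 1).getD []    -- sep "." ≠ "": never none
    let title := match parts with
      | _ :: p1 :: _ => PySem.Str.strip p1
      | _ => "Unnamed Bug"
    (bugs, some ((PySem.Dict.empty.insert "title" title).insert "description" ""))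
  else
    match st.2 with                           -- 'elif current_bug:'
    | some cb => (st.1, some (cb.modify "description" "" (fun d => d ++ (line ++ "\n"))))
    | none => st

def parse_bugs_py (bug_section : String) : List (List (String × String)) :=
  let lines := (PySem.Str.split? bug_section "\n").getD []   -- sep ≠ "": never none
  let st := lines.foldl pvStepA ([], none)
  let bugs := match st.2 with                 -- final 'if current_bug: bugs.append(current_bug)'
    | some cb => st.1 ++ [cb]
    | none => st.1
  bugs.map (fun d => d.items)                 -- dicts as association lists

-- ===== PORT B =====
-- B phase 1: partition stripped non-empty lines into groups headed by digit-leading lines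
def pvStepB (gs : List (List String)) (ln : String) : List (List String) :=
  if (match ln.toList with | c :: _ => PySem.Chars.isdigit c | [] => false) then
    gs ++ [[ln]]                              -- 'groups.append([ln])'
  else
    match gs.getLast? with                    -- 'elif groups: groups[-1].append(ln)'
    | some g => gs.dropLast ++ [g ++ [ln]]
    | none => gs

-- B phase 2: each group becomes one bug dict
def pvGroupToBug (g : List String) : List (String × String) :=
  let parts := (PySem.Str.splitMax? (g.headD "") "." 1).getD []   -- 'g[0].split(".", 1)'
  let title := match parts with
    | _ :: p1 :: _ => PySem.Str.strip p1
    | _ => "Unnamed Bug"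
  let desc := g.tail.foldl (fun d s => d ++ (s ++ "\n")) ""       -- 'for s in g[1:]: desc += s + "\n"'
  [("title", title), ("description", desc)]

def parse_bugs_py_alt (bug_section : String) : List (List (String × String)) :=
  let nonempty := (((PySem.Str.split? bug_section "\n").getD []).map PySem.Str.strip).filter
    (fun l => l ≠ "")
  let groups := nonempty.foldl pvStepB []
  groups.map pvGroupToBug

-- ===== PRECONDITION & SPEC =====
def Spec_parse_bugs_py (bug_section : String) (out : List (List (String × String))) : Prop := out = parse_bugs_py_alt bug_section
instance (bug_section : String) (out : List (List (String × String))) : Decidable (Spec_parse_bugs_py bug_section out) := by unfold Spec_parse_bugs_py; infer_instance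

-- ===== CLAIM (what is proved, stated in full; the proofs are below) =====
def Claim_equal_parse_bugs_py : Prop := ∀ (bug_section : String), Dom_parse_bugs_py bug_section → Spec_parse_bugs_py bug_section (parse_bugs_py bug_section)

-- ===== LEMMAS AND PROOFS =====

-- the dict a group denotes, as a PySem.Dict
def pvGroupDict (g : List String) : PySem.Dict String String := PySem.Dict.mk (pvGroupToBug g)

-- A's step on an already-stripped nonempty line (the body of pvStepA past the two guards)
def pvStepA' (st : List (PySem.Dict String String) × Option (PySem.Dict String String))
    (line : String) : List (PySem.Dict String String) × Option (PySem.Dict String String) :=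
  if (match line.toList with | c :: _ => PySem.Chars.isdigit c | [] => false) then
    let bugs := match st.2 with
      | some cb => st.1 ++ [cb]
      | none => st.1
    let parts := (PySem.Str.splitMax? line "." 1).getD []
    let title := match parts with
      | _ :: p1 :: _ => PySem.Str.strip p1
      | _ => "Unnamed Bug"
    (bugs, some ((PySem.Dict.empty.insert "title" title).insert "description" ""))
  else
    match st.2 with
    | some cb => (st.1, some (cb.modify "description" "" (fun d => d ++ (line ++ "\n"))))
    | none => st

theorem pvStepA_eq (st : List (PySem.Dict String String) × Option (PySem.Dict String String))
    (raw : String) :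
    pvStepA st raw = if PySem.Str.strip raw = "" then st else pvStepA' st (PySem.Str.strip raw) := rfl

theorem pvFoldA_filter (ls : List String)
    (st : List (PySem.Dict String String) × Option (PySem.Dict String String)) :
    ls.foldl pvStepA st = ((ls.map PySem.Str.strip).filter (fun l => l ≠ "")).foldl pvStepA' st := by
  induction ls generalizing st with
  | nil => rfl
  | cons l ls ih =>
    simp only [List.foldl_cons, List.map_cons, List.filter_cons, pvStepA_eq]
    by_cases h : PySem.Str.strip l = ""
    · simp [h, ih]
    · simp [h, ih]

theorem pvDict_insert_lit (t : String) :
    (PySem.Dict.empty.insert "title" t).insert "description" "" =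
      PySem.Dict.mk [("title", t), ("description", "")] := by
  simp [PySem.Dict.insert, PySem.Dict.empty, PySem.Dict.contains]

theorem pvDict_modify_lit (t x y : String) :
    (PySem.Dict.mk [("title", t), ("description", x)]).modify "description" "" (· ++ y) =
      PySem.Dict.mk [("title", t), ("description", x ++ y)] := by
  simp [PySem.Dict.modify, PySem.Dict.insert, PySem.Dict.getD, PySem.Dict.get?]

theorem pvGroupDict_singleton (ln : String) :
    pvGroupDict [ln] =
      (PySem.Dict.empty.insert "title"
        (match (PySem.Str.splitMax? ln "." 1).getD [] with
          | _ :: p1 :: _ => PySem.Str.strip p1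
          | _ => "Unnamed Bug")).insert "description" "" := by
  rw [pvDict_insert_lit]
  rfl

theorem pvGroupDict_append (g : List String) (hg : g ≠ []) (ln : String) :
    pvGroupDict (g ++ [ln]) =
      (pvGroupDict g).modify "description" "" (fun d => d ++ (ln ++ "\n")) := by
  obtain ⟨c, g', rfl⟩ := List.exists_cons_of_ne_nil hg
  show pvGroupDict (c :: (g' ++ [ln])) = _
  unfold pvGroupDict pvGroupToBug
  rw [pvDict_modify_lit]
  simp [List.foldl_append]

-- A's final 'append current if present'
def pvAbs (st : List (PySem.Dict String String) × Option (PySem.Dict String String)) :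
    List (PySem.Dict String String) :=
  match st.2 with
  | some cb => st.1 ++ [cb]
  | none => st.1

theorem pvAbs_rel (gs : List (List String)) :
    pvAbs (gs.dropLast.map pvGroupDict, gs.getLast?.map pvGroupDict) = gs.map pvGroupDict := by
  rcases List.eq_nil_or_concat gs with rfl | ⟨hs, g, rfl⟩
  · rfl
  · simp [pvAbs]

theorem pvLoop (ls : List String) (gs : List (List String)) (hne : ∀ g ∈ gs, g ≠ []) :
    ls.foldl pvStepA' (gs.dropLast.map pvGroupDict, gs.getLast?.map pvGroupDict) =
      ((ls.foldl pvStepB gs).dropLast.map pvGroupDict,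
       (ls.foldl pvStepB gs).getLast?.map pvGroupDict) ∧
    (∀ g ∈ ls.foldl pvStepB gs, g ≠ []) := by
  induction ls generalizing gs with
  | nil => exact ⟨rfl, hne⟩
  | cons ln ls ih =>
    simp only [List.foldl_cons]
    by_cases hd : (match ln.toList with | c :: _ => PySem.Chars.isdigit c | [] => false) = true
    · -- digit-leading line: new group / new current bug
      have hB : pvStepB gs ln = gs ++ [[ln]] := by simp [pvStepB, hd]
      have hA : pvStepA' (gs.dropLast.map pvGroupDict, gs.getLast?.map pvGroupDict) ln =
          ((gs ++ [[ln]]).dropLast.map pvGroupDict, (gs ++ [[ln]]).getLast?.map pvGroupDict) := by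
        unfold pvStepA'
        rw [if_pos hd]
        have h1 : (gs ++ [[ln]]).dropLast = gs := List.dropLast_concat ..
        have h2 : (gs ++ [[ln]]).getLast? = some [ln] := List.getLast?_concat ..
        rcases List.eq_nil_or_concat gs with rfl | ⟨hs, g, rfl⟩
        · simp [pvGroupDict_singleton]
        · simp only [h1, h2, Option.map_some]
          simp [pvGroupDict_singleton]
      rw [hA, hB]
      refine ih (gs ++ [[ln]]) ?_
      intro g hg
      rcases List.mem_append.mp hg with h | h
      · exact hne g h
      · simp at h; simp [h]
    · -- continuation line
      rcases List.eq_nil_or_concat gs with rfl | ⟨hs, g, rfl⟩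
      · have hB : pvStepB [] ln = [] := by simp [pvStepB, hd]
        have hA : pvStepA' (([] : List (List String)).dropLast.map pvGroupDict,
            ([] : List (List String)).getLast?.map pvGroupDict) ln =
            (([] : List (List String)).dropLast.map pvGroupDict,
             ([] : List (List String)).getLast?.map pvGroupDict) := by
          unfold pvStepA'
          rw [if_neg hd]
          rfl
        rw [hA, hB]
        exact ih [] hne
      · simp only [List.concat_eq_append] at hne ⊢
        have hgne : g ≠ [] := hne g (by simp)
        have hB : pvStepB (hs ++ [g]) ln = hs ++ [g ++ [ln]] := by
          simp [pvStepB, hd]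
        have hA : pvStepA' ((hs ++ [g]).dropLast.map pvGroupDict,
            (hs ++ [g]).getLast?.map pvGroupDict) ln =
            ((hs ++ [g ++ [ln]]).dropLast.map pvGroupDict,
             (hs ++ [g ++ [ln]]).getLast?.map pvGroupDict) := by
          unfold pvStepA'
          rw [if_neg hd]
          simp only [List.getLast?_concat, List.dropLast_concat, Option.map_some]
          rw [pvGroupDict_append g hgne ln]
        rw [hA, hB]
        refine ih (hs ++ [g ++ [ln]]) ?_
        intro g' hg'
        rcases List.mem_append.mp hg' with h | h
        · exact hne g' (by simp [h])
        · simp at h; simp [h]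

-- ===== VERDICT (by name: the statement is the Claim_ definition above) =====
theorem parse_bugs_py_spec : Claim_equal_parse_bugs_py := by
  intro s _
  show parse_bugs_py s = parse_bugs_py_alt s
  have e1 : parse_bugs_py s =
      (pvAbs ((((PySem.Str.split? s "\n").getD []).foldl pvStepA ([], none)))).map
        (fun d => d.items) := rfl
  have e2 : parse_bugs_py_alt s =
      (((((PySem.Str.split? s "\n").getD []).map PySem.Str.strip).filter
        (fun l => l ≠ "")).foldl pvStepB []).map pvGroupToBug := rfl
  rw [e1, e2, pvFoldA_filter]
  set ls := ((((PySem.Str.split? s "\n").getD []).map PySem.Str.strip).filter (fun l => l ≠ ""))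
    with hls
  obtain ⟨h1, _⟩ := pvLoop ls [] (by simp)
  rw [show ((([] : List (List String)).dropLast.map pvGroupDict,
      ([] : List (List String)).getLast?.map pvGroupDict)) =
      (([] : List (PySem.Dict String String)), (none : Option (PySem.Dict String String)))
    from rfl] at h1
  rw [h1, pvAbs_rel, List.map_map]
  rfl
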